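-- pv_equiv track=rewrite | github.com/jatinarora2702/Competitive-Coding | codeforces/2123C.py | solve
-- ===== SOURCE A (Python) =====
-- def solve(a: list[int], n: int) -> str:
--     mins = []
--     minm = float("inf")
--     for x in a:
--         if x < minm:
--             minm = x
--         mins.append(minm)
--     maxs = [-float("inf")] * len(a)
--     maxm = -float("inf")
--     for i in range(len(a)-1, -1, -1):
--         if a[i] > maxm:
--             maxm = a[i]
--         maxs[i] = maxm
--
--     ans = []
--     for i in range(len(a)):
--         if i == 0 or i == len(a) - 1:
--             ans.append("1")
--         elif mins[i-1] < a[i] < maxs[i+1]: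
--             ans.append("0")
--         else:
--             ans.append("1")
--     return "".join(ans)
-- ===== SOURCE B (Python) =====
-- def solve(a: list[int], n: int) -> str:
--     # Divide and conquer: render the segment a[lo:hi] given the minimum of the
--     # elements before lo (pmin, None if there are none) and the maximum of the
--     # elements after hi (smax, None if there are none).  A position is '0'
--     # exactly when some earlier element is smaller and some later element is
--     # larger; splitting at the midpoint, each half only needs those two
--     # aggregates of the other half (min of the left half, max of the right).
--     def rec(lo, hi, pmin, smax):
--         if hi - lo == 0:
--             return ""
--         if hi - lo == 1:
--             x = a[lo]
--             inner = pmin is not None and pmin < x and smax is not None and x < smax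
--             return "0" if inner else "1"
--         mid = (lo + hi) // 2
--         lmin = min(a[lo:mid])
--         rmax = max(a[mid:hi])
--         npmin = lmin if pmin is None else min(pmin, lmin)
--         nsmax = rmax if smax is None else max(smax, rmax)
--         return rec(lo, mid, pmin, nsmax) + rec(mid, hi, npmin, smax)
--     return rec(0, len(a), None, None)
-- ===== Notes on version B (the rewrite author's own statement) =====
-- stated objective: alternative
-- what changed: B replaces A's three linear passes with materialized prefix-min and suffix-max arrays by a divide-and-conquer recursion: each half of the array is rendered given only two aggregates (min of the elements before it, max of the elements after it), computed as min/max of the sibling half's slice; no arrays and no per-index endpoint branch.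
import Mathlib
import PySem

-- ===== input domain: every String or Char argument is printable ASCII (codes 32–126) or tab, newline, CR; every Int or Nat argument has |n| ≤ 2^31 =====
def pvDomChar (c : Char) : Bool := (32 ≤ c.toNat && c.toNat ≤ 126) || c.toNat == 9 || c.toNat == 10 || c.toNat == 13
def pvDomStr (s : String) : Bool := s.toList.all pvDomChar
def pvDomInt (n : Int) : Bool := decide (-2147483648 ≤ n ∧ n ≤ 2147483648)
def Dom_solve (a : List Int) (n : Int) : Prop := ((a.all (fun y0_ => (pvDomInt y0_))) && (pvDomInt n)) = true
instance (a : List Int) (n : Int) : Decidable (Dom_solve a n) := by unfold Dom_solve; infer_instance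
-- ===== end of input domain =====

-- B replaces A's three linear passes over prefix-min/suffix-max arrays by a divide-and-conquer
-- recursion that renders each half given two aggregates (min before, max after) — an alternative
-- decomposition with no arrays.

-- ===== PORT A =====
-- A's first loop: running minimum (float("inf") start modelled as `none`; the comparison
-- `x < inf` is always true, so every stored entry is an Int — exact).
def pvMinsAux : List Int → Option Int → List Int
  | [], _ => []
  | x :: xs, m =>
      let m' := match m with | none => x | some v => if x < v then x else v
      m' :: pvMinsAux xs (some m')

-- A's second loop (right-to-left): returns (final maxm, the maxs array); -inf start = `none`.
def pvAmax : List Int → Option Int × List Int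
  | [] => (none, [])
  | x :: xs =>
      let r := pvAmax xs
      let m' := match r.1 with | none => x | some v => if x > v then x else v
      (some m', m' :: r.2)

def solve (a : List Int) (n : Int) : String :=
  let mins := pvMinsAux a none
  let maxs := (pvAmax a).2
  let ans := (List.range a.length).map (fun i =>
    if i = 0 ∨ i = a.length - 1 then "1"
    else if mins.getD (i-1) 0 < a.getD i 0 ∧ a.getD i 0 < maxs.getD (i+1) 0 then "0"
    else "1")
  String.join ans

-- ===== PORT B =====
-- Source B's rec(lo, hi, pmin, smax): render the segment a[lo:hi], given the min of the elements
-- before lo and the max of the elements after hi (None = absent).  a[lo] is in range on every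
-- call rec makes, so getD is exact there; min()/max() of the (nonempty) Python slices are
-- PySem.List.min?/max? (the `none` default is unreachable).
def pvRec (a : List Int) (fuel : Nat) (lo hi : Nat) (pmin smax : Option Int) : String :=
  match fuel with
  | 0 => ""  -- fuel ≥ hi - lo on every call (totality guard only; reached iff the segment is empty)
  | f + 1 =>
    if hi - lo = 0 then ""
    else if hi - lo = 1 then
      let x := a.getD lo 0
      let inner := (match pmin with | none => false | some p => decide (p < x)) &&
                   (match smax with | none => false | some s => decide (x < s))
      if inner then "0" else "1"
    else
      let mid := (lo + hi) / 2
      let lmin := match PySem.List.min? (PySem.List.slice a (some (lo : Int)) (some (mid : Int))) (fun y => y) with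
                  | some v => v | none => 0
      let rmax := match PySem.List.max? (PySem.List.slice a (some (mid : Int)) (some (hi : Int))) (fun y => y) with
                  | some v => v | none => 0
      let npmin := match pmin with | none => lmin | some p => min p lmin
      let nsmax := match smax with | none => rmax | some s => max s rmax
      pvRec a f lo mid pmin (some nsmax) ++ pvRec a f mid hi (some npmin) smax

def solve_alt (a : List Int) (n : Int) : String :=
  pvRec a a.length 0 a.length none none

-- ===== PRECONDITION & SPEC =====
def Spec_solve (a : List Int) (n : Int) (out : String) : Prop := out = solve_alt a n
instance (a : List Int) (n : Int) (out : String) : Decidable (Spec_solve a n out) := by unfold Spec_solve; infer_instance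

-- ===== CLAIM (what is proved, stated in full; the proofs are below) =====
def Claim_equal_solve : Prop := ∀ (a : List Int) (n : Int), Dom_solve a n → Spec_solve a n (solve a n)

-- ===== LEMMAS AND PROOFS =====

-- option-valued running min / max over a list
def mmin (m : Option Int) (x : Int) : Option Int :=
  some (match m with | none => x | some v => min v x)
def mmax (m : Option Int) (x : Int) : Option Int :=
  some (match m with | none => x | some v => max v x)
def fmin (m : Option Int) (xs : List Int) : Option Int := xs.foldl mmin m
def fmax (m : Option Int) (xs : List Int) : Option Int := xs.foldl mmax m

-- boolean comparisons against an optional bound ('None' compares as absent → false)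
def ltB (m : Option Int) (x : Int) : Bool :=
  match m with | none => false | some v => decide (v < x)
def gtB (m : Option Int) (x : Int) : Bool :=
  match m with | none => false | some v => decide (x < v)

-- the common reference: left-to-right rendering, pmin threaded down, max of the rest looked up
def Fref (pmin : Option Int) : List Int → Option Int → String
  | [], _ => ""
  | x :: rest, smax =>
      (if ltB pmin x && gtB (fmax smax rest) x then "0" else "1") ++ Fref (mmin pmin x) rest smax

-- the per-index cell both programs compute
def cell (pmin : Option Int) (xs : List Int) (smax : Option Int) (i : Nat) : String :=
  if ltB (fmin pmin (xs.take i)) (xs.getD i 0) && gtB (fmax smax (xs.drop (i+1))) (xs.getD i 0)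
  then "0" else "1"

theorem foldl_append_pull (l : List String) (a b : String) :
    l.foldl (· ++ ·) (a ++ b) = a ++ l.foldl (· ++ ·) b := by
  induction l generalizing b with
  | nil => rfl
  | cons x t ih => simpa [String.append_assoc] using ih (b ++ x)

theorem join_cons (s : String) (l : List String) :
    String.join (s :: l) = s ++ String.join l := by
  simpa [String.join] using foldl_append_pull l s ""

theorem fmin_some (xs : List Int) (v : Int) : fmin (some v) xs = some (xs.foldl min v) := by
  induction xs generalizing v with
  | nil => rfl
  | cons x t ih => simpa [fmin, mmin] using ih (min v x)

theorem fmax_some (xs : List Int) (v : Int) : fmax (some v) xs = some (xs.foldl max v) := by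
  induction xs generalizing v with
  | nil => rfl
  | cons x t ih => simpa [fmax, mmax] using ih (max v x)

theorem foldl_min_pull (t : List Int) (p x : Int) :
    t.foldl min (min p x) = min p (t.foldl min x) := by
  induction t generalizing x with
  | nil => rfl
  | cons y r ih => simpa [min_assoc] using ih (min x y)

theorem foldl_max_pull (t : List Int) (p x : Int) :
    t.foldl max (max p x) = max p (t.foldl max x) := by
  induction t generalizing x with
  | nil => rfl
  | cons y r ih => simpa [max_assoc] using ih (max x y)

-- running min with a seed = the seed merged into the seedless running min
theorem fmin_merge (xs : List Int) (m : Option Int) :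
    fmin m xs = match fmin none xs with
                | none => m
                | some v => some (match m with | none => v | some p => min p v) := by
  cases xs with
  | nil => cases m <;> rfl
  | cons x t =>
      cases m with
      | none =>
          simp only [fmin, List.foldl_cons, mmin]
          cases hft : List.foldl mmin (some x) t <;> rfl
      | some p =>
          show fmin (some (min p x)) t = _
          rw [show fmin none (x :: t) = fmin (some x) t by simp [fmin, mmin],
              fmin_some, fmin_some, foldl_min_pull]

theorem fmax_merge (xs : List Int) (m : Option Int) :
    fmax m xs = match fmax none xs with
                | none => m
                | some v => some (match m with | none => v | some p => max p v) := by
  cases xs with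
  | nil => cases m <;> rfl
  | cons x t =>
      cases m with
      | none =>
          simp only [fmax, List.foldl_cons, mmax]
          cases hft : List.foldl mmax (some x) t <;> rfl
      | some p =>
          show fmax (some (max p x)) t = _
          rw [show fmax none (x :: t) = fmax (some x) t by simp [fmax, mmax],
              fmax_some, fmax_some, foldl_max_pull]

theorem fmax_append (xs ys : List Int) (m : Option Int) :
    fmax m (xs ++ ys) = fmax (fmax m xs) ys := by
  simp [fmax, List.foldl_append]

theorem mmax_swap (m : Option Int) (x y : Int) : mmax (mmax m x) y = mmax (mmax m y) x := by
  cases m <;> simp [mmax, max_comm, max_left_comm]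

theorem fmax_push (ys : List Int) (m : Option Int) (x : Int) :
    fmax (mmax m x) ys = mmax (fmax m ys) x := by
  induction ys generalizing m with
  | nil => rfl
  | cons y r ih =>
      show fmax (mmax (mmax m x) y) r = _
      rw [mmax_swap m x y]
      exact ih (mmax m y)

theorem fmax_swap (xs ys : List Int) (m : Option Int) :
    fmax (fmax m ys) xs = fmax (fmax m xs) ys := by
  induction xs generalizing m with
  | nil => rfl
  | cons x t ih =>
      show fmax (mmax (fmax m ys) x) t = fmax (fmax (mmax m x) t) ys
      rw [← fmax_push ys m x]
      exact ih (mmax m x)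

-- splitting the reference rendering at any point
theorem Fref_append (xs ys : List Int) (pmin smax : Option Int) :
    Fref pmin (xs ++ ys) smax = Fref pmin xs (fmax smax ys) ++ Fref (fmin pmin xs) ys smax := by
  induction xs generalizing pmin with
  | nil => simp [Fref, fmin]
  | cons x t ih =>
      show (if ltB pmin x && gtB (fmax smax (t ++ ys)) x then "0" else "1") ++
            Fref (mmin pmin x) (t ++ ys) smax = _
      rw [fmax_append t ys smax, ← fmax_swap t ys smax, ih (mmin pmin x), ← String.append_assoc]
      rfl

-- the reference rendering is the join of the per-index cells
theorem Fref_eq_join (xs : List Int) (pmin smax : Option Int) :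
    Fref pmin xs smax = String.join ((List.range xs.length).map (cell pmin xs smax)) := by
  induction xs generalizing pmin with
  | nil => rfl
  | cons x t ih =>
      have hcell0 : cell pmin (x :: t) smax 0 =
          (if ltB pmin x && gtB (fmax smax t) x then "0" else "1") := by
        simp [cell, fmin]
      have hshift : ∀ j, (cell pmin (x :: t) smax ∘ Nat.succ) j = cell (mmin pmin x) t smax j := by
        intro j
        simp [cell, fmin, Function.comp]
      rw [show (x :: t).length = t.length + 1 from rfl, List.range_succ_eq_map,
          List.map_cons, List.map_map, join_cons,
          List.map_congr_left (fun j _ => hshift j), hcell0]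
      show (if ltB pmin x && gtB (fmax smax t) x then "0" else "1") ++
            Fref (mmin pmin x) t smax = _
      rw [ih (mmin pmin x)]

-- B's recursion renders a[lo:hi] exactly as the reference does (fuel ≥ segment length)
theorem pvRec_eq_Fref (a : List Int) (fuel : Nat) :
    ∀ (lo hi : Nat) (pmin smax : Option Int), hi - lo ≤ fuel → hi ≤ a.length →
    pvRec a fuel lo hi pmin smax = Fref pmin ((a.drop lo).take (hi - lo)) smax := by
  induction fuel with
  | zero =>
      intro lo hi pmin smax hf _
      rw [show hi - lo = 0 by omega]
      simp [pvRec, Fref]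
  | succ f ih =>
      intro lo hi pmin smax hf hlen
      rw [pvRec]
      by_cases h0 : hi - lo = 0
      · simp [h0, Fref]
      · rw [if_neg h0]
        by_cases h1 : hi - lo = 1
        · rw [if_pos h1, h1]
          have hlo : lo < a.length := by omega
          have hseg : (a.drop lo).take 1 = [a.getD lo 0] := by
            rw [show a.drop lo = a.getD lo 0 :: a.drop (lo + 1) by
                  rw [List.getD_eq_getElem a 0 hlo, List.drop_eq_getElem_cons hlo],
                List.take_succ_cons, List.take_zero]
          rw [hseg]
          show _ = (if ltB pmin _ && gtB (fmax smax []) _ then "0" else "1") ++ Fref _ [] smax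
          cases pmin <;> cases smax <;> simp [Fref, fmax, ltB, gtB]
        · rw [if_neg h1]
          have hml : lo < (lo + hi) / 2 := by omega
          have hmr : (lo + hi) / 2 < hi := by omega
          have hsplit : (a.drop lo).take (hi - lo) =
              (a.drop lo).take ((lo + hi) / 2 - lo) ++ (a.drop ((lo + hi) / 2)).take (hi - (lo + hi) / 2) := by
            rw [← List.take_append_drop ((lo + hi) / 2 - lo) ((a.drop lo).take (hi - lo))]
            congr 1
            · rw [List.take_take]; congr 1; omega
            · rw [List.drop_take, List.drop_drop]
              congr 1
              · omega
              · congr 1; omega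
          have hLne : (a.drop lo).take ((lo + hi) / 2 - lo) ≠ [] := by
            have h : ((a.drop lo).take ((lo + hi) / 2 - lo)).length = (lo + hi) / 2 - lo := by
              rw [List.length_take, List.length_drop]; omega
            intro hc; rw [hc] at h; simp at h; omega
          have hRne : (a.drop ((lo + hi) / 2)).take (hi - (lo + hi) / 2) ≠ [] := by
            have h : ((a.drop ((lo + hi) / 2)).take (hi - (lo + hi) / 2)).length = hi - (lo + hi) / 2 := by
              rw [List.length_take, List.length_drop]; omega
            intro hc; rw [hc] at h; simp at h; omega
          obtain ⟨xl, tl, hL⟩ := List.exists_cons_of_ne_nil hLne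
          obtain ⟨xr, tr, hR⟩ := List.exists_cons_of_ne_nil hRne
          have hminL : PySem.List.min? ((a.drop lo).take ((lo + hi) / 2 - lo)) (fun y => y)
              = some (tl.foldl min xl) := by
            rw [hL]; exact PySem.List.min?_id_cons ..
          have hmaxR : PySem.List.max? ((a.drop ((lo + hi) / 2)).take (hi - (lo + hi) / 2)) (fun y => y)
              = some (tr.foldl max xr) := by
            rw [hR]; exact PySem.List.max?_id_cons ..
          have hfminL : fmin none ((a.drop lo).take ((lo + hi) / 2 - lo)) = some (tl.foldl min xl) := by
            rw [hL, show fmin none (xl :: tl) = fmin (some xl) tl by simp [fmin, mmin], fmin_some]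
          have hfmaxR : fmax none ((a.drop ((lo + hi) / 2)).take (hi - (lo + hi) / 2))
              = some (tr.foldl max xr) := by
            rw [hR, show fmax none (xr :: tr) = fmax (some xr) tr by simp [fmax, mmax], fmax_some]
          have e1 : fmax smax ((a.drop ((lo + hi) / 2)).take (hi - (lo + hi) / 2)) =
              some (match smax with | none => tr.foldl max xr | some s => max s (tr.foldl max xr)) := by
            rw [fmax_merge, hfmaxR]
          have e2 : fmin pmin ((a.drop lo).take ((lo + hi) / 2 - lo)) =
              some (match pmin with | none => tl.foldl min xl | some p => min p (tl.foldl min xl)) := by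
            rw [fmin_merge, hfminL]
          simp only [PySem.List.slice_natCast, hminL, hmaxR]
          rw [hsplit, Fref_append, e1, e2,
              ih lo ((lo + hi) / 2) pmin _ (by omega) (by omega),
              ih ((lo + hi) / 2) hi _ smax (by omega) (by omega)]

-- A's maxs array entry i is the running maximum of the suffix starting at i
theorem amax2_get (xs : List Int) (i : Nat) (h : i < xs.length) :
    (pvAmax (xs.drop i)).1 = some ((pvAmax xs).2.getD i 0) := by
  induction xs generalizing i with
  | nil => simp at h
  | cons x xs ih =>
      cases i with
      | zero => simp [pvAmax]
      | succ j =>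
          simp only [List.drop_succ_cons]
          have := ih j (by simpa using h)
          simpa [pvAmax] using this

theorem amax_fst (xs : List Int) : (pvAmax xs).1 = fmax none xs := by
  induction xs with
  | nil => rfl
  | cons x t ih =>
      rw [show fmax none (x :: t) = fmax (some x) t by simp [fmax, mmax], fmax_merge t (some x)]
      simp only [pvAmax, ih]
      cases fmax none t with
      | none => rfl
      | some v =>
          simp only []
          congr 1
          rw [max_def]; split_ifs <;> omega

-- A's mins array entry i is the running minimum of the prefix up to i
theorem mins_take (xs : List Int) (m : Option Int) (i : Nat) (h : i < xs.length) :
    some ((pvMinsAux xs m).getD i 0) = fmin m (xs.take (i + 1)) := by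
  induction xs generalizing m i with
  | nil => simp at h
  | cons x t ih =>
      cases i with
      | zero =>
          simp only [pvMinsAux, List.getD_cons_zero, List.take_succ_cons, List.take_zero]
          cases m with
          | none => rfl
          | some v =>
              show some (if x < v then x else v) = mmin (some v) x
              simp only [mmin]
              congr 1
              rw [min_def]; split_ifs <;> omega
      | succ j =>
          simp only [pvMinsAux, List.getD_cons_succ, List.take_succ_cons]
          rw [ih _ j (by simpa using h)]
          show _ = fmin (mmin m x) (t.take (j + 1))
          congr 1
          cases m with
          | none => rfl
          | some v =>
              simp only [mmin]
              congr 1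
              rw [min_def]; split_ifs <;> omega

-- A's per-index branch equals the common cell
theorem A_cell (a : List Int) (i : Nat) (h : i < a.length) :
    (if i = 0 ∨ i = a.length - 1 then "1"
     else if (pvMinsAux a none).getD (i-1) 0 < a.getD i 0 ∧
             a.getD i 0 < (pvAmax a).2.getD (i+1) 0 then "0" else "1")
    = cell none a none i := by
  by_cases h0 : i = 0
  · subst h0
    simp [cell, fmin, ltB]
  · by_cases hl : i = a.length - 1
    · have hdrop : a.drop (i+1) = [] := List.drop_eq_nil_of_le (by omega)
      rw [if_pos (Or.inr hl)]
      simp [cell, hdrop, fmax, gtB]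
    · rw [if_neg (by omega)]
      have hm : fmin none (a.take i) = some ((pvMinsAux a none).getD (i-1) 0) := by
        have h' := (mins_take a none (i-1) (by omega)).symm
        rwa [show i - 1 + 1 = i by omega] at h'
      have hx : fmax none (a.drop (i+1)) = some ((pvAmax a).2.getD (i+1) 0) := by
        rw [← amax_fst]
        exact amax2_get a (i+1) (by omega)
      rw [cell, hm, hx]
      simp [ltB, gtB]

-- ===== VERDICT (by name: the statement is the Claim_ definition above) =====
theorem solve_spec : Claim_equal_solve := by
  intro a n _
  simp only [Spec_solve, solve, solve_alt]
  rw [List.map_congr_left (fun i hi => A_cell a i (List.mem_range.mp hi)),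
      ← Fref_eq_join,
      pvRec_eq_Fref a a.length 0 a.length none none (by omega) (le_refl _)]
  simp
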